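-- pv_equiv track=rewrite | github.com/conradbooker/wordle | test.py | setCheck
-- ===== SOURCE A (Python) =====
-- def setCheck(word, set, containsAll = False):
--     if containsAll:
--         for char in set:
--             if char not in word: return False
--         return True
--     else:
--         for char in set:
--             if char in word: return False
--         return True
-- ===== SOURCE B (Python) =====
-- def setCheck(word, set, containsAll = False):
--     # Scan the WORD once, collecting the distinct target chars it hits,
--     # then decide by comparing counts; no per-target scan, no early return.
--     found = {c for c in word if c in set}
--     if containsAll:
--         return len(found) == len(frozenset(set))
--     return len(found) == 0
-- ===== Notes on version B (the rewrite author's own statement) =====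
-- stated objective: alternative
-- what changed: Inverts the traversal: instead of looping over the target chars and probing the word per char (with early return), B scans the word once collecting the distinct target chars it contains, then answers by comparing cardinalities (|found| == |distinct targets| for containsAll, |found| == 0 otherwise).
import Mathlib
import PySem

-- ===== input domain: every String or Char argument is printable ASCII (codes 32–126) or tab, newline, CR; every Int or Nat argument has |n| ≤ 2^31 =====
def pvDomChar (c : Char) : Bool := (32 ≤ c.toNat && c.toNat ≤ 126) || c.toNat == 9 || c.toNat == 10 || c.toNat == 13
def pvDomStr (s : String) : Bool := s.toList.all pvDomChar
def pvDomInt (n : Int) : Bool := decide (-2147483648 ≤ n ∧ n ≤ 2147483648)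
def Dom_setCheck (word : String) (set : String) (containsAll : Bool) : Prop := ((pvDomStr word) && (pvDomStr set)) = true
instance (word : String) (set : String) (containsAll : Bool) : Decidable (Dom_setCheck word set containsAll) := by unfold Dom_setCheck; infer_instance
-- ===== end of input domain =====

-- B inverts the traversal: one scan of the WORD collecting the distinct target chars it hits, then a cardinality comparison; proved equal to A on all inputs.
-- ===== PORT A =====
-- loop 'for char in set: if char not in word: return False' / 'return True'
def setCheckAllLoop (word : List Char) : List Char → Bool
  | [] => true
  | c :: cs => if !(word.contains c) then false else setCheckAllLoop word cs

-- loop 'for char in set: if char in word: return False' / 'return True'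
def setCheckNoneLoop (word : List Char) : List Char → Bool
  | [] => true
  | c :: cs => if word.contains c then false else setCheckNoneLoop word cs

def setCheck (word : String) (set : String) (containsAll : Bool) : Bool :=
  if containsAll then setCheckAllLoop word.toList set.toList
  else setCheckNoneLoop word.toList set.toList

-- ===== PORT B =====
def setCheck_alt (word : String) (set : String) (containsAll : Bool) : Bool :=
  -- found = {c for c in word if c in set}
  let found : PySem.Set Char :=
    PySem.Set.ofList (word.toList.filter (fun c => set.toList.contains c))
  if containsAll then
    decide (PySem.Set.len found = PySem.Set.len (PySem.Set.ofList set.toList))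
  else
    decide (PySem.Set.len found = 0)

-- ===== PRECONDITION & SPEC =====
def Spec_setCheck (word : String) (set : String) (containsAll : Bool) (out : Bool) : Prop := out = setCheck_alt word set containsAll
instance (word : String) (set : String) (containsAll : Bool) (out : Bool) : Decidable (Spec_setCheck word set containsAll out) := by unfold Spec_setCheck; infer_instance

-- ===== CLAIM (what is proved, stated in full; the proofs are below) =====
def Claim_equal_setCheck : Prop := ∀ (word : String) (set : String) (containsAll : Bool), Dom_setCheck word set containsAll → Spec_setCheck word set containsAll (setCheck word set containsAll)

-- ===== LEMMAS AND PROOFS =====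
lemma allLoop_eq (w : List Char) : ∀ cs : List Char, setCheckAllLoop w cs = cs.all w.contains := by
  intro cs; induction cs with
  | nil => rfl
  | cons c cs ih => simp [setCheckAllLoop, ih]

lemma noneLoop_eq (w : List Char) : ∀ cs : List Char, setCheckNoneLoop w cs = cs.all (fun c => !w.contains c) := by
  intro cs; induction cs with
  | nil => rfl
  | cons c cs ih => simp [setCheckNoneLoop, ih]

-- |found| = |distinct targets| iff every target char occurs in the word
lemma card_found_eq_iff (w s : List Char) :
    (PySem.Set.ofList (w.filter (fun c => s.contains c))).length
      = (PySem.Set.ofList s).length ↔ ∀ c ∈ s, c ∈ w := by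
  set F := PySem.Set.ofList (w.filter (fun c => s.contains c)) with hF
  set S := PySem.Set.ofList s with hS
  have hFn : F.Nodup := PySem.Set.nodup_ofList _
  have hSn : S.Nodup := PySem.Set.nodup_ofList _
  have hmemF : ∀ c, c ∈ F ↔ (c ∈ w ∧ c ∈ s) := by
    intro c; rw [hF, PySem.Set.mem_ofList]; simp [List.mem_filter]
  have hmemS : ∀ c, c ∈ S ↔ c ∈ s := by
    intro c; rw [hS, PySem.Set.mem_ofList]
  have hsub : F ⊆ S := by
    intro c hc; rw [hmemS]; exact ((hmemF c).1 hc).2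
  constructor
  · intro hlen c hcs
    have hperm : List.Perm F S :=
      (List.subperm_of_subset hFn hsub).perm_of_length_le (le_of_eq hlen.symm)
    have : c ∈ F := hperm.mem_iff.2 ((hmemS c).2 hcs)
    exact ((hmemF c).1 this).1
  · intro hall
    have hperm : List.Perm F S := by
      apply (List.subperm_of_subset hFn hsub).perm_of_length_le
      exact (List.subperm_of_subset hSn (fun c hc => (hmemF c).2 ⟨hall c ((hmemS c).1 hc), (hmemS c).1 hc⟩)).length_le
    exact hperm.length_eq

-- |found| = 0 iff no target char occurs in the word
lemma card_found_zero_iff (w s : List Char) :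
    (PySem.Set.ofList (w.filter (fun c => s.contains c))).length = 0 ↔ ∀ c ∈ s, c ∉ w := by
  rw [List.length_eq_zero_iff, List.eq_nil_iff_forall_not_mem]
  constructor
  · intro h c hcs hcw
    exact h c ((PySem.Set.mem_ofList _ _).2 (List.mem_filter.2 ⟨hcw, by simpa [List.contains_eq_mem] using hcs⟩))
  · intro h c hc
    have := (PySem.Set.mem_ofList _ _).1 hc
    rcases List.mem_filter.1 this with ⟨hcw, hcs⟩
    exact h c (by simpa [List.contains_eq_mem] using hcs) hcw

-- ===== VERDICT (by name: the statement is the Claim_ definition above) =====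
theorem setCheck_spec : Claim_equal_setCheck := by
  intro word set containsAll _
  unfold Spec_setCheck setCheck setCheck_alt
  cases containsAll
  · show setCheckNoneLoop word.toList set.toList = _
    rw [noneLoop_eq, Bool.eq_iff_iff]
    simp only [Bool.false_eq_true, if_false, PySem.Set.len, decide_eq_true_iff,
      Int.natCast_eq_zero, List.all_eq_true, card_found_zero_iff]
    constructor
    · intro h c hcs hcw
      have := h c hcs; simp [List.contains_eq_mem] at this; exact this hcw
    · intro h c hcs
      simp only [Bool.not_eq_true', List.contains_eq_mem, decide_eq_false_iff_not]
      exact h c hcs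
  · show setCheckAllLoop word.toList set.toList = _
    rw [allLoop_eq, Bool.eq_iff_iff]
    simp only [if_true, PySem.Set.len, decide_eq_true_iff, Int.natCast_inj,
      List.all_eq_true, card_found_eq_iff]
    constructor
    · intro h c hcs
      have := h c hcs; simpa [List.contains_eq_mem] using this
    · intro h c hcs
      simp only [List.contains_eq_mem, decide_eq_true_iff]
      exact h c hcs
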